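-- pv_equiv track=rewrite | github.com/chaseuebelhart/Projects | TetrisAgent/evolutionaryAgent/featureFunctions.py | max_hole_height
-- ===== SOURCE A (Python) =====
-- def max_hole_height(board):
--     maxHoleHeight = 0
--     for col in range(0, len(board)):
--         emptySpace = False
--         colHasHole = False
--         colHeight = 0
--         for row in range(len(board[col])-1, -1, -1):
--             if not board[col][row]:
--                 emptySpace = True
--             elif emptySpace:
--                 colHasHole = True
--                 colHeight += 1
--             else:
--                 colHeight += 1
--         if colHasHole and colHeight>maxHoleHeight:
--             maxHoleHeight = colHeight
--     return maxHoleHeight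
-- ===== SOURCE B (Python) =====
-- def max_hole_height(board):
--     best = 0
--     for col in board:
--         filled = sum(1 for c in col if c)
--         top = 0
--         for c in reversed(col):
--             if not c:
--                 break
--             top += 1
--         if filled > top and filled > best:
--             best = filled
--     return best
-- ===== Notes on version B (the rewrite author's own statement) =====
-- stated objective: alternative
-- what changed: Replaces A's stateful reverse scan (emptySpace/colHasHole flags updated cell by cell) with two independent aggregates per column -- total filled count and length of the contiguous top-filled run -- deciding a hole by filled > top and taking the max filled over hole columns.
import Mathlib
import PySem

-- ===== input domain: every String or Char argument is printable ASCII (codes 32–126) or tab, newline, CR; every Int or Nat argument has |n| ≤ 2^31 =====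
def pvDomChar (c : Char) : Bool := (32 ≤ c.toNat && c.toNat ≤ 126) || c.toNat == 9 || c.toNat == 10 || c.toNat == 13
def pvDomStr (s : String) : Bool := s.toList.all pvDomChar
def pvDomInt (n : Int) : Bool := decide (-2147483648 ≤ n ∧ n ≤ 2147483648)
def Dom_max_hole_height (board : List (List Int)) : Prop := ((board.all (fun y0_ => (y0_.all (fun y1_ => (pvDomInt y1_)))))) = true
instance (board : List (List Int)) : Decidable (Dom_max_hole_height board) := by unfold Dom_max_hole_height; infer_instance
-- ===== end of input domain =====

-- B replaces A's stateful reverse scan (flags updated cell by cell) by two per-column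
-- aggregates (filled count, top contiguous run) compared at the end: objective 'alternative'.

-- ===== PORT A =====
-- A's inner row loop runs row = len-1 .. 0 reading board[col][row]: ported as a fold over col.reverse.
def max_hole_height (board : List (List Int)) : Int :=
  board.foldl
    (fun maxHoleHeight col =>
      let s := col.reverse.foldl
        (fun (st : Bool × Bool × Int) cell =>
          if cell = 0 then (true, st.2.1, st.2.2)            -- not board[col][row]: emptySpace = True
          else if st.1 then (st.1, true, st.2.2 + 1)          -- elif emptySpace: colHasHole; colHeight += 1
          else (st.1, st.2.1, st.2.2 + 1))                    -- else: colHeight += 1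
        (false, false, 0)
      if s.2.1 = true ∧ s.2.2 > maxHoleHeight then s.2.2 else maxHoleHeight)
    0

-- ===== PORT B =====
-- filled = sum(1 for c in col if c)
def bFilled (col : List Int) : Int :=
  col.foldl (fun n c => if c ≠ 0 then n + 1 else n) 0

-- top = length of the leading nonzero run (B iterates reversed(col) and breaks at the first 0)
def bTop : List Int → Int
  | [] => 0
  | c :: rest => if c = 0 then 0 else bTop rest + 1

def max_hole_height_alt (board : List (List Int)) : Int :=
  board.foldl
    (fun best col =>
      let filled := bFilled col
      if filled > bTop col.reverse ∧ filled > best then filled else best)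
    0

-- ===== PRECONDITION & SPEC =====
def Spec_max_hole_height (board : List (List Int)) (out : Int) : Prop := out = max_hole_height_alt board
instance (board : List (List Int)) (out : Int) : Decidable (Spec_max_hole_height board out) := by unfold Spec_max_hole_height; infer_instance

-- ===== CLAIM (what is proved, stated in full; the proofs are below) =====
def Claim_equal_max_hole_height : Prop := ∀ (board : List (List Int)), Dom_max_hole_height board → Spec_max_hole_height board (max_hole_height board)

-- ===== LEMMAS AND PROOFS =====

-- nonzero count of a column, as an Int
def pvCnt (l : List Int) : Int := ((l.countP (fun c => decide (c ≠ 0)) : Nat) : Int)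

-- A's inner-loop body, named for the proofs (definitionally the lambda in the port)
def pvStepA (st : Bool × Bool × Int) (cell : Int) : Bool × Bool × Int :=
  if cell = 0 then (true, st.2.1, st.2.2)
  else if st.1 then (st.1, true, st.2.2 + 1)
  else (st.1, st.2.1, st.2.2 + 1)

theorem pvStepA_zero (e hl : Bool) (h : Int) {c : Int} (hc : c = 0) :
    pvStepA (e, hl, h) c = (true, hl, h) := by simp [pvStepA, hc]

theorem pvStepA_hole (hl : Bool) (h : Int) {c : Int} (hc : c ≠ 0) :
    pvStepA (true, hl, h) c = (true, true, h + 1) := by simp [pvStepA, hc]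

theorem pvStepA_fill (hl : Bool) (h : Int) {c : Int} (hc : c ≠ 0) :
    pvStepA (false, hl, h) c = (false, hl, h + 1) := by simp [pvStepA, hc]

theorem pvCnt_nil : pvCnt [] = 0 := rfl

theorem pvCnt_cons (c : Int) (l : List Int) :
    pvCnt (c :: l) = (if c = 0 then 0 else 1) + pvCnt l := by
  by_cases h : c = 0 <;> simp [pvCnt, List.countP_cons, h] <;> omega

theorem pvCnt_nonneg (l : List Int) : 0 ≤ pvCnt l := by
  simp [pvCnt]

theorem pvCnt_reverse (l : List Int) : pvCnt l.reverse = pvCnt l := by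
  simp [pvCnt]

theorem bFilled_go (l : List Int) (n : Int) :
    l.foldl (fun n c => if c ≠ 0 then n + 1 else n) n = n + pvCnt l := by
  induction l generalizing n with
  | nil => simp [pvCnt_nil]
  | cons c r ih =>
      rw [List.foldl_cons]
      by_cases h : c = 0
      · have hs : (if c ≠ 0 then n + 1 else n) = n := by simp [h]
        rw [hs, ih, pvCnt_cons]; simp [h]
      · have hs : (if c ≠ 0 then n + 1 else n) = n + 1 := by simp [h]
        rw [hs, ih, pvCnt_cons]; simp [h]; ring

theorem bFilled_eq (col : List Int) : bFilled col = pvCnt col := by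
  unfold bFilled
  simpa using bFilled_go col 0

-- characterisation of A's inner fold (over the already-reversed column)
theorem innerFold_eq (l : List Int) (e hl : Bool) (h : Int) :
    l.foldl pvStepA (e, hl, h)
    = (e || l.any (fun c => decide (c = 0)),
       hl || (if e then decide (0 < pvCnt l) else decide (bTop l < pvCnt l)),
       h + pvCnt l) := by
  induction l generalizing e hl h with
  | nil => cases e <;> simp [pvCnt_nil, bTop]
  | cons c r ih =>
      rw [List.foldl_cons]
      by_cases hc : c = 0
      · rw [pvStepA_zero e hl h hc, ih]
        subst hc
        have hcnt : pvCnt (0 :: r) = pvCnt r := by simp [pvCnt_cons]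
        cases e <;> simp [hcnt, bTop]
      · have hcnt : pvCnt (c :: r) = 1 + pvCnt r := by simp [pvCnt_cons, hc]
        cases e
        · rw [pvStepA_fill hl h hc, ih]
          have htop : bTop (c :: r) = bTop r + 1 := by simp [bTop, hc]
          have hdec : (decide (bTop (c :: r) < pvCnt (c :: r))) = (decide (bTop r < pvCnt r)) := by
            rw [htop, hcnt]
            by_cases hlt : bTop r < pvCnt r
            · simp [hlt]; omega
            · simp [hlt]; omega
          simp only [Prod.mk.injEq]
          refine ⟨by simp [hc], ?_, ?_⟩
          · rw [hdec]; simp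
          · rw [hcnt]; ring
        · rw [pvStepA_hole hl h hc, ih]
          have hpos : (0 : Int) < pvCnt (c :: r) := by
            have := pvCnt_nonneg r; rw [hcnt]; omega
          simp only [Prod.mk.injEq]
          refine ⟨by simp, ?_, ?_⟩
          · simp [hpos]
          · rw [hcnt]; ring

theorem step_eq :
    (fun (maxHoleHeight : Int) (col : List Int) =>
      let s := col.reverse.foldl
        (fun (st : Bool × Bool × Int) cell =>
          if cell = 0 then (true, st.2.1, st.2.2)
          else if st.1 then (st.1, true, st.2.2 + 1)
          else (st.1, st.2.1, st.2.2 + 1))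
        (false, false, 0)
      if s.2.1 = true ∧ s.2.2 > maxHoleHeight then s.2.2 else maxHoleHeight)
    = (fun (best : Int) (col : List Int) =>
      let filled := bFilled col
      if filled > bTop col.reverse ∧ filled > best then filled else best) := by
  funext m col
  show (let s := col.reverse.foldl pvStepA (false, false, 0)
        if s.2.1 = true ∧ s.2.2 > m then s.2.2 else m) = _
  simp only [innerFold_eq, bFilled_eq, ← pvCnt_reverse col]
  by_cases hh : bTop col.reverse < pvCnt col.reverse <;> simp [hh]

-- ===== VERDICT (by name: the statement is the Claim_ definition above) =====
theorem max_hole_height_spec : Claim_equal_max_hole_height := by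
  intro board _
  show max_hole_height board = max_hole_height_alt board
  unfold max_hole_height max_hole_height_alt
  rw [step_eq]
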